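-- pv_equiv track=rewrite | github.com/thaheer-uzamaki/Code | Pairs.py | count_letter_pairs
-- ===== SOURCE A (Python) =====
-- def count_letter_pairs(string):
--     # Initialize a dictionary to store letter counts
--     letter_counts = {}
--     # Count occurrences of each letter
--     for letter in string:
--         if letter in letter_counts:
--             letter_counts[letter] += 1
--         else:
--             letter_counts[letter] = 1
--     # Calculate the number of pairs
--     pair_count = 0
--     for count in letter_counts.values():
--         pair_count += count // 2  # Integer division to get the number of pairs
--     return pair_count
-- ===== SOURCE B (Python) =====
-- def count_letter_pairs(string):
--     # One pass: keep the set of characters currently seen an odd number of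
--     # times; a repeat of such a character completes a pair.
--     pairs = 0
--     odd = set()
--     for ch in string:
--         if ch in odd:
--             pairs += 1
--             odd.discard(ch)
--         else:
--             odd.add(ch)
--     return pairs
-- ===== Notes on version B (the rewrite author's own statement) =====
-- stated objective: simpler
-- what changed: Replaces the build-a-frequency-dict-then-sum-count//2 two-phase algorithm with a single pass that toggles characters in an odd-count set and counts a pair each time a toggled character repeats.
import Mathlib
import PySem

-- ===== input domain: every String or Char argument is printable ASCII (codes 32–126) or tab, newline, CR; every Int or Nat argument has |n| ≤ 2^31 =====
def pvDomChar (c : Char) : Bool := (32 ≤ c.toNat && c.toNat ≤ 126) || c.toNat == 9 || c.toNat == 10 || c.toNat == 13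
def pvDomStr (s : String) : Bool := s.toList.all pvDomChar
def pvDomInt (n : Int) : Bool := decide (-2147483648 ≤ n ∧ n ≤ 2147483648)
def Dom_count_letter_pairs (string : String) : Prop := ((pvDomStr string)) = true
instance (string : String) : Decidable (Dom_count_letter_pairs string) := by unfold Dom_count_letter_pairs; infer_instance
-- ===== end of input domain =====

-- B replaces A's frequency-dict-then-sum pass with a single pass toggling an odd-count set (same cost, simpler).


-- ===== PORT A =====
def count_letter_pairs (string : String) : Int :=
  let letter_counts : PySem.Dict Char Int :=
    string.toList.foldl (fun d letter =>
      if d.contains letter then d.insert letter (d.getD letter 0 + 1)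
      else d.insert letter 1) PySem.Dict.empty
  letter_counts.values.foldl (fun pair_count count => pair_count + PySem.Int.floordiv count 2) 0

-- ===== PORT B =====
-- loop body of B: toggle ch in the odd-count set, count a completed pair
def pvStepB (st : Int × PySem.Set Char) (ch : Char) : Int × PySem.Set Char :=
  if PySem.Set.contains st.2 ch then (st.1 + 1, PySem.Set.discard st.2 ch)
  else (st.1, PySem.Set.add st.2 ch)

def count_letter_pairs_alt (string : String) : Int :=
  (string.toList.foldl pvStepB (0, PySem.Set.empty)).1

-- ===== PRECONDITION & SPEC =====
def Spec_count_letter_pairs (string : String) (out : Int) : Prop := out = count_letter_pairs_alt string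
instance (string : String) (out : Int) : Decidable (Spec_count_letter_pairs string out) := by unfold Spec_count_letter_pairs; infer_instance

-- ===== CLAIM (what is proved, stated in full; the proofs are below) =====
def Claim_equal_count_letter_pairs : Prop := ∀ (string : String), Dom_count_letter_pairs string → Spec_count_letter_pairs string (count_letter_pairs string)

-- ===== LEMMAS AND PROOFS =====

-- common value both programs compute: per distinct char, count // 2, summed
def pairsOf (l : List Char) : Nat :=
  ((PySem.Set.ofList l).map (fun k => l.count k / 2)).sum

-- A's first loop is the standard counter loop
lemma countA_eq (l : List Char) :
    (l.foldl (fun d letter =>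
      if d.contains letter then d.insert letter (d.getD letter 0 + 1)
      else d.insert letter 1) PySem.Dict.empty) = PySem.Dict.counter l := by
  rw [← PySem.Dict.foldl_insert_getD_add_one_eq_counter]
  congr 1
  funext d x
  by_cases h : d.contains x
  · simp [h]
  · have h2 : d.get? x = none := by
      rw [PySem.Dict.get?_eq_none_iff_contains, Bool.eq_false_iff.mpr h]
    simp [h, PySem.Dict.getD, h2]

lemma A_eq_pairsOf (s : String) : count_letter_pairs s = (pairsOf s.toList : Int) := by
  unfold count_letter_pairs
  rw [countA_eq]
  rw [PySem.List.foldl_add (g := fun c => PySem.Int.floordiv c 2)]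
  simp only [PySem.Dict.values, PySem.Dict.items_counter, List.map_map]
  rw [pairsOf, Nat.cast_list_sum, List.map_map]
  refine (zero_add _).trans (congrArg List.sum (List.map_congr_left ?_))
  intro k _
  simp only [Function.comp_def]
  rw [PySem.Int.floordiv_eq_ediv_of_pos (by omega)]
  exact (Int.natCast_div _ _).symm

lemma count_append_ne (l : List Char) (x k : Char) (h : k ≠ x) :
    (l ++ [x]).count k = l.count k := by
  simp [List.count_append, Ne.symm h]

lemma count_append_self (l : List Char) (x : Char) :
    (l ++ [x]).count x = l.count x + 1 := by
  simp [List.count_append]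

lemma pairsOf_append (l : List Char) (x : Char) :
    pairsOf (l ++ [x]) = pairsOf l + (if l.count x % 2 = 1 then 1 else 0) := by
  unfold pairsOf
  rw [PySem.Set.ofList_append_singleton]
  by_cases hx : x ∈ l
  · have hxs : x ∈ PySem.Set.ofList l := (PySem.Set.mem_ofList l x).mpr hx
    rw [PySem.Set.add_of_mem hxs]
    have hnd : (PySem.Set.ofList l).Nodup := PySem.Set.nodup_ofList l
    have hperm := List.perm_cons_erase hxs
    rw [List.Perm.sum_eq (hperm.map _), List.Perm.sum_eq (hperm.map _)]
    simp only [List.map_cons, List.sum_cons]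
    have herase : ∀ k ∈ (PySem.Set.ofList l).erase x,
        (l ++ [x]).count k / 2 = l.count k / 2 := by
      intro k hk
      rw [count_append_ne l x k (hnd.mem_erase_iff.mp hk).1]
    rw [List.map_congr_left herase, count_append_self]
    have hsplit : (l.count x + 1) / 2
        = l.count x / 2 + (if l.count x % 2 = 1 then 1 else 0) := by
      split_ifs with h <;> omega
    rw [hsplit]; ring
  · have hxs : x ∉ PySem.Set.ofList l := fun h => hx ((PySem.Set.mem_ofList l x).mp h)
    rw [PySem.Set.add_of_not_mem hxs]
    rw [List.map_append, List.sum_append]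
    have hsame : ∀ k ∈ PySem.Set.ofList l,
        (l ++ [x]).count k / 2 = l.count k / 2 := by
      intro k hk
      exact congrArg (· / 2) (count_append_ne l x k (fun e => hxs (e ▸ hk)))
    rw [List.map_congr_left hsame]
    have hc0 : l.count x = 0 := List.count_eq_zero.mpr hx
    simp [hc0]

-- B's loop invariant: first component is pairsOf of the prefix read so far,
-- second component holds exactly the chars with an odd count so far
lemma B_inv (l : List Char) :
    (l.foldl pvStepB (0, PySem.Set.empty)).1 = (pairsOf l : Int) ∧
    ∀ c, c ∈ (l.foldl pvStepB (0, PySem.Set.empty)).2 ↔ l.count c % 2 = 1 := by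
  induction l using List.reverseRecOn with
  | nil => simp [pairsOf, PySem.Set.empty]
  | append_singleton l x ih =>
    obtain ⟨ih1, ih2⟩ := ih
    rw [List.foldl_append]
    set st := l.foldl pvStepB (0, PySem.Set.empty) with hst
    by_cases hmem : x ∈ st.2
    · have hodd : l.count x % 2 = 1 := (ih2 x).mp hmem
      have hc : PySem.Set.contains st.2 x = true := (PySem.Set.contains_iff st.2 x).mpr hmem
      constructor
      · simp only [List.foldl_cons, List.foldl_nil, pvStepB, hc, if_true]
        rw [pairsOf_append, ih1, if_pos hodd]; push_cast; ring
      · intro c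
        simp only [List.foldl_cons, List.foldl_nil, pvStepB, hc, if_true]
        rw [PySem.Set.mem_discard]
        by_cases hcx : c = x
        · subst hcx
          simp only [ne_eq, not_true_eq_false, and_false, false_iff]
          rw [List.count_append]
          simp; omega
        · rw [ih2 c, List.count_append]
          simp [Ne.symm hcx, hcx]
    · have heven : ¬ l.count x % 2 = 1 := fun h => hmem ((ih2 x).mpr h)
      have hc : PySem.Set.contains st.2 x = false := by
        rw [Bool.eq_false_iff]; intro h; exact hmem ((PySem.Set.contains_iff st.2 x).mp h)
      constructor
      · simp only [List.foldl_cons, List.foldl_nil, pvStepB, hc, Bool.false_eq_true, if_false]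
        rw [pairsOf_append, ih1, if_neg heven]; push_cast; ring
      · intro c
        simp only [List.foldl_cons, List.foldl_nil, pvStepB, hc, Bool.false_eq_true, if_false]
        rw [PySem.Set.mem_add]
        by_cases hcx : c = x
        · subst hcx
          simp only [or_true, true_iff]
          rw [List.count_append]; simp; omega
        · rw [or_iff_left hcx, ih2 c, List.count_append]
          simp [Ne.symm hcx]

-- ===== VERDICT (by name: the statement is the Claim_ definition above) =====
theorem count_letter_pairs_spec : Claim_equal_count_letter_pairs := by
  intro s _
  show count_letter_pairs s = count_letter_pairs_alt s
  rw [A_eq_pairsOf, count_letter_pairs_alt, (B_inv s.toList).1]
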